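-- pv_equiv track=rewrite | github.com/toilaluan/beacon-hf | train.py | inject_checkpoint
-- ===== SOURCE A (Python) =====
-- from typing import List, Dict, Any, Iterator, Tuple
--
-- def inject_checkpoint(ids: List[int], stride: int, checkpoint_id: int) -> List[int]:
--     injected = []
--     if len(ids) < stride:
--         return ids
--     for i in range(0, len(ids), stride):
--         injected.extend(ids[i : i + stride])
--         if i + stride < len(ids):
--             injected.append(checkpoint_id)
--     return injected
-- ===== SOURCE B (Python) =====
-- def inject_checkpoint(ids, stride, checkpoint_id):
--     if len(ids) < stride:
--         return ids
--     out = []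
--     for i, x in enumerate(ids):
--         if i and i % stride == 0:
--             out.append(checkpoint_id)
--         out.append(x)
--     return out
-- ===== Notes on version B (the rewrite author's own statement) =====
-- stated objective: alternative
-- what changed: B replaces A's strided-index loop over slices (extend chunk, append separator while more chunks remain) by a single element-wise pass over enumerate(ids) that appends the checkpoint id before any element whose index is a nonzero multiple of stride, so no slicing or stride-stepped range is used at all.
-- outside the precondition, e.g. on inject_checkpoint([1, 2, 3], -1, 5): A returns [], B returns [1, 5, 2, 5, 3]; on inject_checkpoint([1, 2], 0, 9): A raises ValueError, B raises ZeroDivisionError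
import Mathlib
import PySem

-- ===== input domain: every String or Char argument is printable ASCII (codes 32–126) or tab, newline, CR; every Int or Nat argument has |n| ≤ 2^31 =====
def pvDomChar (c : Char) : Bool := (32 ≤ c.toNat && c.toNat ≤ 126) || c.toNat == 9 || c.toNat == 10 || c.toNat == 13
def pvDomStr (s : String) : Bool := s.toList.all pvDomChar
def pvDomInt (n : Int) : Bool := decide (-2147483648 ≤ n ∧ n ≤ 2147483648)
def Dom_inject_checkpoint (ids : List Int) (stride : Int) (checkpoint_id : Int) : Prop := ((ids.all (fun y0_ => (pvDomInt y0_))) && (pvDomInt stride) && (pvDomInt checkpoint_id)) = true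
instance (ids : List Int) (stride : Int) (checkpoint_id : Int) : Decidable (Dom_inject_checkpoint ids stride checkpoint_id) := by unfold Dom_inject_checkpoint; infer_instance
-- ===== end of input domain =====

-- B replaces A's stride-stepped loop over slices by a single element-wise pass over
-- enumerate(ids) that inserts the checkpoint id before every element whose index is a
-- nonzero multiple of stride (no slicing, no stride-stepped range); objective: alternative.

-- ===== PORT A =====
def inject_checkpoint (ids : List Int) (stride : Int) (checkpoint_id : Int) : List Int :=
  -- injected = []; if len(ids) < stride: return ids
  if (ids.length : Int) < stride then ids
  else
    -- for i in range(0, len(ids), stride): injected.extend(ids[i:i+stride]); if i+stride < len(ids): injected.append(checkpoint_id)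
    (PySem.List.pyRange 0 (ids.length : Int) stride).foldl
      (fun injected i =>
        (injected ++ PySem.List.slice ids (some i) (some (i + stride))) ++
          (if i + stride < (ids.length : Int) then [checkpoint_id] else []))
      []

-- ===== PORT B =====
def inject_checkpoint_alt (ids : List Int) (stride : Int) (checkpoint_id : Int) : List Int :=
  if (ids.length : Int) < stride then ids
  else
    -- for i, x in enumerate(ids): if i and i % stride == 0: out.append(checkpoint_id); out.append(x)
    (PySem.List.enumerate ids 0).foldl
      (fun out ix =>
        (if ix.1 ≠ 0 ∧ PySem.Int.mod ix.1 stride = 0 then out ++ [checkpoint_id] else out) ++ [ix.2])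
      []

-- ===== PRECONDITION & SPEC =====
-- Pre_ restricts to the task's natural domain, a positive stride: for stride = 0 A raises
-- ValueError (range step 0) and B raises ZeroDivisionError; for negative stride A's range is
-- empty so A returns [] discarding all ids (an accidental corner outside the natural domain),
-- while B separates by Python's signed modulo.
def Pre_inject_checkpoint (ids : List Int) (stride : Int) (checkpoint_id : Int) : Prop := 1 ≤ stride
instance (ids : List Int) (stride : Int) (checkpoint_id : Int) : Decidable (Pre_inject_checkpoint ids stride checkpoint_id) := by unfold Pre_inject_checkpoint; infer_instance
def pvWitness_inject_checkpoint : List Int × Int × Int := ([1, 2, 3, 4, 5], 2, 99)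

def Spec_inject_checkpoint (ids : List Int) (stride : Int) (checkpoint_id : Int) (out : List Int) : Prop := out = inject_checkpoint_alt ids stride checkpoint_id
instance (ids : List Int) (stride : Int) (checkpoint_id : Int) (out : List Int) : Decidable (Spec_inject_checkpoint ids stride checkpoint_id out) := by unfold Spec_inject_checkpoint; infer_instance

-- ===== CLAIM (what is proved, stated in full; the proofs are below) =====
def Claim_equal_inject_checkpoint : Prop := ∀ (ids : List Int) (stride : Int) (checkpoint_id : Int), Dom_inject_checkpoint ids stride checkpoint_id → Pre_inject_checkpoint ids stride checkpoint_id → Spec_inject_checkpoint ids stride checkpoint_id (inject_checkpoint ids stride checkpoint_id)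

-- ===== LEMMAS AND PROOFS =====

-- common normal form: the list of stride-sized chunks joined by the checkpoint id
def pvChunks (σ : Nat) (cid : Int) (xs : List Int) : List Int :=
  if h : σ = 0 ∨ xs.length ≤ σ then xs
  else xs.take σ ++ cid :: pvChunks σ cid (xs.drop σ)
termination_by xs.length
decreasing_by
  push_neg at h
  simp only [List.length_drop]
  omega

-- A's accumulator loop is a flatMap.
theorem pv_foldl_app {α : Type} (g h : α → List Int) (l : List α) (acc : List Int) :
    l.foldl (fun a x => (a ++ g x) ++ h x) acc = acc ++ l.flatMap (fun x => g x ++ h x) := by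
  induction l generalizing acc with
  | nil => simp
  | cons x t ih => rw [List.foldl_cons, ih]; simp [List.append_assoc]

-- congruence for flatMap over List.range
theorem pv_flatMap_range_congr (f g : Nat → List Int) (m : Nat)
    (h : ∀ k, k < m → f k = g k) :
    (List.range m).flatMap f = (List.range m).flatMap g := by
  induction m with
  | zero => simp
  | succ m ih =>
    rw [List.range_succ, List.flatMap_append, List.flatMap_append,
      ih (fun k hk => h k (by omega))]
    simp [h m (by omega)]

-- A's flatMap normal form, chunk by chunk, equals pvChunks.
theorem pv_flat_chunks (σ : Nat) (cid : Int) : ∀ (m : Nat) (xs : List Int),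
    1 ≤ σ → xs.length ≤ σ * (m + 1) → σ * m < xs.length →
    (List.range (m + 1)).flatMap (fun k =>
        PySem.List.slice xs (some ((σ * k : Nat) : Int)) (some (((σ * k : Nat) : Int) + (σ : Int))) ++
          if ((σ * k : Nat) : Int) + (σ : Int) < (xs.length : Int) then [cid] else []) =
      pvChunks σ cid xs := by
  intro m
  induction m with
  | zero =>
    intro xs hσ hub hlb
    have hcond : ¬ (((σ * 0 : Nat) : Int) + (σ : Int) < (xs.length : Int)) := by
      have h1 : σ * 0 = 0 := by ring
      have h2 : σ * (0 + 1) = σ := by ring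
      rw [h1]
      push_cast
      omega
    rw [pvChunks, dif_pos (Or.inr (by omega))]
    rw [List.range_one, List.flatMap_cons, List.flatMap_nil, if_neg hcond, List.append_nil,
      List.append_nil]
    have := PySem.List.slice_natCast_add xs (σ * 0) σ
    rw [this, Nat.mul_zero, List.drop_zero]
    exact List.take_of_length_le (by omega)
  | succ m ih =>
    intro xs hσ hub hlb
    have hmul1 : σ * (m + 1) = σ * m + σ := by ring
    have hmul2 : σ * (m + 1 + 1) = σ * (m + 1) + σ := by ring
    have hσn : σ < xs.length := by omega
    have hcond0 : ((σ * 0 : Nat) : Int) + (σ : Int) < (xs.length : Int) := by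
      rw [Nat.mul_zero]
      push_cast
      omega
    rw [List.range_succ_eq_map, List.flatMap_cons, List.flatMap_map]
    have hf0 : PySem.List.slice xs (some ((σ * 0 : Nat) : Int)) (some (((σ * 0 : Nat) : Int) + (σ : Int))) =
        xs.take σ := by
      rw [PySem.List.slice_natCast_add xs (σ * 0) σ, Nat.mul_zero, List.drop_zero]
    have htail : (List.range (m + 1)).flatMap (fun a =>
        PySem.List.slice xs (some ((σ * a.succ : Nat) : Int)) (some (((σ * a.succ : Nat) : Int) + (σ : Int))) ++
          if ((σ * a.succ : Nat) : Int) + (σ : Int) < (xs.length : Int) then [cid] else []) =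
        pvChunks σ cid (xs.drop σ) := by
      have hd : (List.drop σ xs).length = xs.length - σ := List.length_drop
      rw [← ih (xs.drop σ) hσ (by omega) (by omega)]
      refine pv_flatMap_range_congr _ _ _ (fun k hk => ?_)
      have hmulk : σ * (k + 1) = σ * k + σ := by ring
      have hsl : PySem.List.slice xs (some ((σ * (k + 1) : Nat) : Int)) (some (((σ * (k + 1) : Nat) : Int) + (σ : Int))) =
          PySem.List.slice (xs.drop σ) (some ((σ * k : Nat) : Int)) (some (((σ * k : Nat) : Int) + (σ : Int))) := by
        rw [PySem.List.slice_natCast_add, PySem.List.slice_natCast_add, List.drop_drop]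
        congr 2
        ring
      have hcast : ((σ * (k + 1) : Nat) : Int) = ((σ * k : Nat) : Int) + (σ : Int) := by
        push_cast; ring
      have hc : (((σ * (k + 1) : Nat) : Int) + (σ : Int) < (xs.length : Int)) ↔
          (((σ * k : Nat) : Int) + (σ : Int) < ((xs.drop σ).length : Int)) := by
        rw [hd]
        omega
      simp only [Nat.succ_eq_add_one]
      rw [hsl]
      congr 1
      by_cases h : ((σ * (k + 1) : Nat) : Int) + (σ : Int) < (xs.length : Int)
      · rw [if_pos h, if_pos (hc.mp h)]
      · rw [if_neg h, if_neg (fun hh => h (hc.mpr hh))]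
    conv_rhs => rw [pvChunks]
    rw [dif_neg (by push_neg; exact ⟨by omega, by omega⟩), htail, hf0, if_pos hcond0]
    simp [List.append_assoc]

-- A equals pvChunks when 1 ≤ stride ≤ len.
theorem pv_A_chunks (xs : List Int) (s cid : Int) (hs : 1 ≤ s) (hn : s ≤ (xs.length : Int)) :
    inject_checkpoint xs s cid = pvChunks s.toNat cid xs := by
  obtain ⟨σ, rfl⟩ : ∃ σ : Nat, s = (σ : Int) := ⟨s.toNat, (Int.toNat_of_nonneg (by omega)).symm⟩
  have hσ : 1 ≤ σ := by exact_mod_cast hs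
  unfold inject_checkpoint
  rw [if_neg (by omega), Int.toNat_natCast]
  rw [PySem.List.pyRange_of_pos _ _ (by exact_mod_cast hσ : (0:Int) < (σ : Int))]
  rw [if_pos (by omega : (0:Int) < (xs.length : Int)), List.foldl_map,
    pv_foldl_app
      (fun k : Nat => PySem.List.slice xs (some (0 + (σ : Int) * (k : Int))) (some (0 + (σ : Int) * (k : Int) + (σ : Int))))
      (fun k : Nat => if 0 + (σ : Int) * (k : Int) + (σ : Int) < (xs.length : Int) then [cid] else []),
    List.nil_append]
  set q : Int := ((xs.length : Int) - 0 + (σ : Int) - 1) / (σ : Int) with hq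
  have hdm : (σ : Int) * q + ((xs.length : Int) - 0 + (σ : Int) - 1) % (σ : Int) =
      (xs.length : Int) - 0 + (σ : Int) - 1 := by
    rw [hq]; exact Int.ediv_add_emod _ _
  have hr0 : 0 ≤ ((xs.length : Int) - 0 + (σ : Int) - 1) % (σ : Int) :=
    Int.emod_nonneg _ (by omega)
  have hrs : ((xs.length : Int) - 0 + (σ : Int) - 1) % (σ : Int) < (σ : Int) :=
    Int.emod_lt_of_pos _ (by omega)
  have hq1 : 1 ≤ q := by
    by_contra hcon
    have h0 : q ≤ 0 := by omega
    have := mul_le_mul_of_nonneg_left h0 (by omega : (0:Int) ≤ (σ : Int))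
    simp only [mul_zero] at this
    omega
  obtain ⟨m, hm⟩ : ∃ m : Nat, q.toNat = m + 1 := ⟨q.toNat - 1, by omega⟩
  have hqm : q = (m : Int) + 1 := by omega
  have hx : (σ : Int) * q = (σ : Int) * (m : Int) + (σ : Int) := by rw [hqm]; ring
  have hub : xs.length ≤ σ * (m + 1) := by
    have h2 : ((σ * (m + 1) : Nat) : Int) = (σ : Int) * (m : Int) + (σ : Int) := by push_cast; ring
    omega
  have hlb : σ * m < xs.length := by
    have h2 : ((σ * m : Nat) : Int) = (σ : Int) * (m : Int) := by push_cast; ring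
    omega
  rw [hm, ← pv_flat_chunks σ cid m xs hσ hub hlb]
  refine pv_flatMap_range_congr _ _ _ (fun k hk => ?_)
  have harg : 0 + (σ : Int) * (k : Int) = ((σ * k : Nat) : Int) := by push_cast; ring
  rw [harg]

-- B's per-index emission, starting at index t
def pvG (s cid : Int) : List Int → Int → List Int
  | [], _ => []
  | x :: r, t => (if t ≠ 0 ∧ PySem.Int.mod t s = 0 then [cid] else []) ++ x :: pvG s cid r (t + 1)

-- B's fold over enumerate is pvG
theorem pvB_fold (s cid : Int) : ∀ (xs : List Int) (t : Int) (acc : List Int),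
    (PySem.List.enumerate xs t).foldl
        (fun out ix => (if ix.1 ≠ 0 ∧ PySem.Int.mod ix.1 s = 0 then out ++ [cid] else out) ++ [ix.2]) acc =
      acc ++ pvG s cid xs t := by
  intro xs
  induction xs with
  | nil => intro t acc; simp [PySem.List.enumerate, pvG]
  | cons x r ih =>
    intro t acc
    rw [PySem.List.enumerate_cons, List.foldl_cons, ih]
    by_cases h : t ≠ 0 ∧ PySem.Int.mod t s = 0
    · simp [pvG, h, List.append_assoc]
    · simp [pvG, h, List.append_assoc]

-- no separator fires while 1 ≤ t and t + len ≤ s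
theorem pvG_small (s cid : Int) : ∀ (xs : List Int) (t : Int), 1 ≤ t → t + (xs.length : Int) ≤ s →
    pvG s cid xs t = xs := by
  intro xs
  induction xs with
  | nil => intro t _ _; rfl
  | cons x r ih =>
    intro t ht hb
    simp only [List.length_cons] at hb
    push_cast at hb
    have hts : t < s := by omega
    have hmod : PySem.Int.mod t s = t := by
      rw [PySem.Int.mod_eq_emod_of_pos (by omega : (0:Int) < s)]
      exact Int.emod_eq_of_lt (by omega) hts
    have hcond : ¬ (t ≠ 0 ∧ PySem.Int.mod t s = 0) := by
      rw [hmod]; omega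
    rw [pvG, if_neg hcond, ih (t + 1) (by omega) (by omega)]
    simp

-- shifting the start index by s changes nothing once t ≥ 1
theorem pvG_shift (s cid : Int) (hs : 1 ≤ s) : ∀ (xs : List Int) (t : Int), 1 ≤ t →
    pvG s cid xs t = pvG s cid xs (t + s) := by
  intro xs
  induction xs with
  | nil => intro t _; rfl
  | cons x r ih =>
    intro t ht
    have hmod : PySem.Int.mod (t + s) s = PySem.Int.mod t s := by
      rw [PySem.Int.mod_eq_emod_of_pos (by omega : (0:Int) < s),
        PySem.Int.mod_eq_emod_of_pos (by omega : (0:Int) < s)]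
      conv_lhs => rw [show t + s = t + s * 1 by ring]
      exact Int.add_mul_emod_self_left t s 1
    have hcond : (t ≠ 0 ∧ PySem.Int.mod t s = 0) ↔ ((t + s) ≠ 0 ∧ PySem.Int.mod (t + s) s = 0) := by
      rw [hmod]; constructor <;> intro h <;> exact ⟨by omega, h.2⟩
    have htail : pvG s cid r (t + 1) = pvG s cid r (t + s + 1) := by
      rw [ih (t + 1) (by omega), show t + 1 + s = t + s + 1 by ring]
    rw [pvG, pvG, htail]
    by_cases h : t ≠ 0 ∧ PySem.Int.mod t s = 0
    · rw [if_pos h, if_pos (hcond.mp h)]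
    · rw [if_neg h, if_neg (fun hh => h (hcond.mpr hh))]

-- pvG splits over append
theorem pvG_split (s cid : Int) : ∀ (a b : List Int) (t : Int),
    pvG s cid (a ++ b) t = pvG s cid a t ++ pvG s cid b (t + (a.length : Int)) := by
  intro a
  induction a with
  | nil => intro b t; simp [pvG]
  | cons x r ih =>
    intro b t
    simp only [List.cons_append, pvG, ih, List.length_cons]
    push_cast
    rw [show t + 1 + (r.length : Int) = t + ((r.length : Int) + 1) by ring]
    simp [List.append_assoc]

-- B's elementwise pass from index 0 equals pvChunks (fuel = an upper bound on length)
theorem pvB_chunks (σ : Nat) (cid : Int) (hσ : 1 ≤ σ) : ∀ (fuel : Nat) (xs : List Int), xs.length ≤ fuel →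
    pvG (σ : Int) cid xs 0 = pvChunks σ cid xs := by
  intro fuel
  induction fuel with
  | zero =>
    intro xs hf
    have : xs = [] := List.eq_nil_of_length_eq_zero (by omega)
    subst this
    rw [pvChunks]
    simp [pvG]
  | succ fuel ih =>
    intro xs hf
    match xs with
    | [] => rw [pvChunks]; simp [pvG]
    | x :: r =>
      by_cases hsmall : (x :: r).length ≤ σ
      · rw [pvChunks, dif_pos (Or.inr hsmall)]
        simp only [List.length_cons] at hsmall
        rw [pvG, if_neg (by simp), List.nil_append, zero_add,
          pvG_small (σ : Int) cid r 1 (le_refl 1) (by omega)]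
      · push_neg at hsmall
        rw [pvChunks, dif_neg (by push_neg; exact ⟨by omega, by omega⟩)]
        have hsplit : x :: r = (x :: r).take σ ++ (x :: r).drop σ := (List.take_append_drop _ _).symm
        conv_lhs => rw [hsplit]
        rw [pvG_split, List.length_take, min_eq_left (by omega), zero_add]
        -- first chunk: indices 0 .. σ-1, no separator
        have h1 : pvG (σ : Int) cid ((x :: r).take σ) 0 = (x :: r).take σ := by
          obtain ⟨σ', hσ'⟩ : ∃ σ', σ = σ' + 1 := ⟨σ - 1, by omega⟩
          rw [hσ', List.take_succ_cons, pvG, if_neg (by simp), List.nil_append, zero_add,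
            pvG_small ((σ' + 1 : Nat) : Int) cid (r.take σ') 1 (le_refl 1)
              (by rw [List.length_take, min_eq_left (by simp only [List.length_cons] at hsmall; omega)]
                  push_cast
                  omega)]
      -- rest: leading index σ fires the separator, then behaves like a fresh run
        have hne : (x :: r).drop σ ≠ [] := by
          simp only [ne_eq, ← List.length_eq_zero_iff, List.length_drop]
          omega
        obtain ⟨y, q, hyq⟩ := List.exists_cons_of_ne_nil hne
        have h2 : pvG (σ : Int) cid ((x :: r).drop σ) ((σ : Int)) = cid :: pvG (σ : Int) cid ((x :: r).drop σ) 0 := by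
          rw [hyq, pvG, pvG]
          rw [if_pos ⟨by exact_mod_cast (by omega : ¬ σ = 0), by
              rw [PySem.Int.mod_natCast, Nat.mod_self]; rfl⟩,
            if_neg (by simp), List.nil_append, zero_add]
          rw [show ((σ : Int)) + 1 = 1 + (σ : Int) by ring,
            ← pvG_shift (σ : Int) cid (by exact_mod_cast hσ) q 1 (le_refl 1)]
          rfl
        rw [h1, h2, ih ((x :: r).drop σ) (by
          simp only [List.length_drop, List.length_cons] at *
          omega)]

-- ===== VERDICT (by name: the statement is the Claim_ definition above) =====
theorem inject_checkpoint_spec : Claim_equal_inject_checkpoint := by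
  intro ids stride checkpoint_id _ hpre
  unfold Spec_inject_checkpoint
  have hs : 1 ≤ stride := hpre
  by_cases hlt : (ids.length : Int) < stride
  · unfold inject_checkpoint inject_checkpoint_alt
    rw [if_pos hlt, if_pos hlt]
  · have hB : inject_checkpoint_alt ids stride checkpoint_id = pvChunks stride.toNat checkpoint_id ids := by
      unfold inject_checkpoint_alt
      rw [if_neg hlt, pvB_fold, List.nil_append]
      have hσ : stride = ((stride.toNat : Nat) : Int) := (Int.toNat_of_nonneg (by omega)).symm
      conv_lhs => rw [hσ]
      exact pvB_chunks stride.toNat checkpoint_id (by omega) ids.length ids (le_refl _)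
    rw [pv_A_chunks ids stride checkpoint_id hs (by omega), hB]
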